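-- pv_equiv track=rewrite | github.com/bhavyakukkar/MEAT.encrypter | encrypter.py | sauce_blender
-- ===== SOURCE A (Python) =====
-- def sauce_blender(sauce, instance):
--     sauce = list(sauce)
--     sauce_length = len(sauce)
--
--     if(instance == 1 or instance == 3):
--         sauce = sauce[::-1]
--     if(instance == 2):
--         for i in range(sauce_length):
--             if(i%2 == 0 and i != sauce_length-1):
--                 temp_particle = sauce[i];
--                 sauce[i] = sauce[i+1];
--             if(i%2 == 1):
--                 sauce[i] = temp_particle;
--
--     return string(sauce)
--
-- def string(list_):
--     return "".join(list_)
-- ===== SOURCE B (Python) =====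
-- def sauce_blender(sauce, instance):
--     if instance == 1 or instance == 3:
--         return sauce[::-1]
--     if instance == 2:
--         chars = list(sauce)
--         return "".join("".join(chars[i:i + 2][::-1])
--                        for i in range(0, len(chars), 2))
--     return sauce
-- ===== Notes on version B (the rewrite author's own statement) =====
-- stated objective: simpler
-- what changed: Replaces the in-place index loop with its cross-iteration temp variable by chunking the string into fixed-size pairs and reversing each chunk (a lone trailing character reverses to itself); the reverse/identity dispatch returns early instead of rebuilding the string.
import Mathlib
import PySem

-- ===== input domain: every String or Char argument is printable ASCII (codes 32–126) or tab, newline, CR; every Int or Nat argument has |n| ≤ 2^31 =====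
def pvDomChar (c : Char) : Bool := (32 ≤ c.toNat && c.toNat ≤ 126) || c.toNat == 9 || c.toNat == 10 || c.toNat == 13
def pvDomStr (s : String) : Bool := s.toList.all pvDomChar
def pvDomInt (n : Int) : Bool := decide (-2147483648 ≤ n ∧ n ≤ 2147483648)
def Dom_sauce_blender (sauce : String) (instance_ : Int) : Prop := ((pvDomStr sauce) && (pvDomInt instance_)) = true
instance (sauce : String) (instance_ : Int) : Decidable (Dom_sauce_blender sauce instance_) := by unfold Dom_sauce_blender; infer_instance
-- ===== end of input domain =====

-- B replaces A's in-place index-swap loop (with its cross-iteration temp variable) by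
-- chunking the characters into fixed pairs and reversing each chunk; objective: simpler.


-- ===== PORT A =====
-- one iteration of A's `for i in range(sauce_length)` body; state = (sauce, temp_particle).
-- Python's temp_particle starts unbound; it is written (at the preceding even i) before
-- every read (at odd i), so the port carries a plain Char initialised to ' '.
def blendStep (n : Nat) (st : List Char × Char) (i : Nat) : List Char × Char :=
  let l := st.1
  let t := st.2
  -- if(i%2 == 0 and i != sauce_length-1): temp_particle = sauce[i]; sauce[i] = sauce[i+1]
  let p : List Char × Char :=
    if i % 2 == 0 && i != n - 1 then (l.set i (l.getD (i + 1) ' '), l.getD i ' ') else (l, t)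
  -- if(i%2 == 1): sauce[i] = temp_particle
  (if i % 2 == 1 then p.1.set i p.2 else p.1, p.2)

def sauce_blender (sauce : String) (instance_ : Int) : String :=
  let s := sauce.toList                                                -- sauce = list(sauce)
  let n := s.length                                                    -- sauce_length = len(sauce)
  let s := if instance_ == 1 || instance_ == 3 then s.reverse else s   -- sauce = sauce[::-1]
  let s := if instance_ == 2 then ((List.range n).foldl (blendStep n) (s, ' ')).1 else s
  String.ofList s                                                      -- return "".join(sauce)

-- ===== PORT B =====
def sauce_blender_alt (sauce : String) (instance_ : Int) : String :=
  if instance_ == 1 || instance_ == 3 then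
    String.ofList sauce.toList.reverse                                 -- sauce[::-1]
  else if instance_ == 2 then
    let chars := sauce.toList
    -- "".join("".join(chars[i:i+2][::-1]) for i in range(0, len(chars), 2))
    String.ofList (((PySem.List.pyRange 0 (chars.length : Int) 2).map
      (fun i => (PySem.List.slice chars (some i) (some (i + 2))).reverse)).flatten)
  else
    sauce

-- ===== PRECONDITION & SPEC =====
def Spec_sauce_blender (sauce : String) (instance_ : Int) (out : String) : Prop := out = sauce_blender_alt sauce instance_
instance (sauce : String) (instance_ : Int) (out : String) : Decidable (Spec_sauce_blender sauce instance_ out) := by unfold Spec_sauce_blender; infer_instance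

-- ===== CLAIM (what is proved, stated in full; the proofs are below) =====
def Claim_equal_sauce_blender : Prop := ∀ (sauce : String) (instance_ : Int), Dom_sauce_blender sauce instance_ → Spec_sauce_blender sauce instance_ (sauce_blender sauce instance_)

-- ===== LEMMAS AND PROOFS =====

-- the common mathematical description of both instance==2 computations
def swapPairs : List Char → List Char
  | a :: b :: r => b :: a :: swapPairs r
  | l => l

theorem range_step2 (L : Nat) :
    PySem.List.pyRange 0 (L : Int) 2 = (List.range ((L + 1) / 2)).map (fun k : Nat => ((2 * k : Nat) : Int)) := by
  rw [PySem.List.pyRange_of_pos 0 (L : Int) (by norm_num)]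
  have h : (if (0 : Int) < (L : Int) then (((L : Int) - 0 + 2 - 1) / 2).toNat else 0) = (L + 1) / 2 := by
    split_ifs with h
    · omega
    · omega
  rw [h]
  exact List.map_congr_left (fun k _ => by push_cast; ring)

theorem chunk_nat (l : List Char) (m : Nat) :
    PySem.List.slice l (some (m : Int)) (some ((m : Int) + 2)) = (l.drop m).take 2 := by
  have h : ((m : Int) + 2) = ((m + 2 : Nat) : Int) := by push_cast; ring
  rw [h, PySem.List.slice_natCast]
  congr 1
  omega

-- flatten of the pair chunks, phrased over Nat only
theorem chunksG (l : List Char) :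
    ((List.range ((l.length + 1) / 2)).map (fun k => ((l.drop (2 * k)).take 2).reverse)).flatten
      = swapPairs l := by
  induction l using swapPairs.induct with
  | case1 a b r ih =>
    have hlen : (a :: b :: r).length = r.length + 2 := by simp
    have hdiv : (r.length + 2 + 1) / 2 = (r.length + 1) / 2 + 1 := by omega
    rw [hlen, hdiv, List.range_succ_eq_map]
    simp only [List.map_cons, List.map_map, List.flatten_cons]
    have hrest : ∀ k : Nat,
        (((a :: b :: r).drop (2 * Nat.succ k)).take 2).reverse
          = ((r.drop (2 * k)).take 2).reverse := by
      intro k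
      have : 2 * Nat.succ k = (2 * k) + 1 + 1 := by omega
      rw [this]
      simp
    simp only [Function.comp_def]
    rw [List.map_congr_left (fun k (_ : k ∈ List.range ((r.length + 1) / 2)) => hrest k), ih]
    simp [swapPairs]
  | case2 l h =>
    match l, h with
    | [], _ => rfl
    | [a], _ =>
      have h1 : (([a] : List Char).length + 1) / 2 = 1 := by simp
      rw [h1, List.range_one]
      simp [swapPairs]
    | a :: b :: r, h => exact (h a b r rfl).elim

-- B's instance==2 branch computes swapPairs
theorem altB_eq_swapPairs (l : List Char) :
    (((PySem.List.pyRange 0 (l.length : Int) 2).map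
      (fun i => (PySem.List.slice l (some i) (some (i + 2))).reverse)).flatten) = swapPairs l := by
  rw [range_step2, List.map_map]
  rw [List.map_congr_left (g := fun k => ((l.drop (2 * k)).take 2).reverse) (fun k _ => by
    simp only [Function.comp]
    rw [chunk_nat])]
  exact chunksG l

-- A's loop, processing indices [pre.length, n), swaps the pairs of `rest` in place
theorem loopA (n : Nat) (rest : List Char) : ∀ (pre : List Char) (t : Char),
    pre.length % 2 = 0 → n = pre.length + rest.length →
    ∃ t', (List.range' pre.length rest.length).foldl (blendStep n) (pre ++ rest, t)
          = (pre ++ swapPairs rest, t') := by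
  induction rest using swapPairs.induct with
  | case1 a b r ih =>
    intro pre t hev hn
    have hlen : (a :: b :: r).length = r.length + 1 + 1 := by simp
    rw [hlen, List.range'_succ, List.range'_succ]
    -- first iteration, i = pre.length (even, not last)
    have hn' : n = pre.length + r.length + 2 := by simp at hn; omega
    have hne : (pre.length != n - 1) = true := by
      simp only [bne_iff_ne, ne_eq]
      omega
    have hmod : (pre.length % 2 == 0) = true := by simp [hev]
    have g1 : (pre ++ a :: b :: r).getD pre.length ' ' = a := by
      simp [List.getD_eq_getElem?_getD]
    have g2 : (pre ++ a :: b :: r).getD (pre.length + 1) ' ' = b := by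
      rw [List.getD_eq_getElem?_getD, List.getElem?_append_right (by omega)]
      simp
    have s1 : (pre ++ a :: b :: r).set pre.length b = pre ++ b :: b :: r := by
      rw [List.set_append_right _ _ (le_refl _)]
      simp
    have step1 : blendStep n (pre ++ a :: b :: r, t) pre.length = (pre ++ b :: b :: r, a) := by
      simp only [blendStep, hne, hmod, Bool.and_self, if_true, g1, g2, s1]
      have : (pre.length % 2 == 1) = false := by simp [hev]
      simp [this]
    -- second iteration, i = pre.length + 1 (odd)
    have s2 : (pre ++ b :: b :: r).set (pre.length + 1) a = pre ++ b :: a :: r := by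
      rw [List.set_append_right _ _ (by omega)]
      simp [List.set]
    have step2 : blendStep n (pre ++ b :: b :: r, a) (pre.length + 1) = (pre ++ b :: a :: r, a) := by
      have h0 : ((pre.length + 1) % 2 == 0) = false := by simp; omega
      have h1 : ((pre.length + 1) % 2 == 1) = true := by simp; omega
      simp [blendStep, h0, h1, s2]
    simp only [List.foldl_cons, step1, step2]
    have hsplit : pre ++ b :: a :: r = (pre ++ [b, a]) ++ r := by simp
    have hidx : pre.length + 1 + 1 = (pre ++ [b, a]).length := by simp
    rw [hsplit, hidx]
    obtain ⟨t', ht'⟩ := ih (pre ++ [b, a]) a (by simp; omega) (by simp; omega)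
    exact ⟨t', by rw [ht']; simp [swapPairs]⟩
  | case2 l h =>
    match l, h with
    | [], _ =>
      intro pre t _ _
      exact ⟨t, by simp [swapPairs]⟩
    | [a], _ =>
      intro pre t hev hn
      have hn' : n = pre.length + 1 := hn
      have hne : (pre.length != n - 1) = false := by
        have h : pre.length = n - 1 := by omega
        simp [h]
      have h1 : (pre.length % 2 == 1) = false := by simp [hev]
      refine ⟨t, ?_⟩
      simp only [List.length_cons, List.length_nil, List.range'_succ, List.range'_zero,
        List.foldl_cons, List.foldl_nil, blendStep, hne, h1, Bool.and_false]
      rfl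
    | a :: b :: r, h => exact (h a b r rfl).elim

-- ===== VERDICT (by name: the statement is the Claim_ definition above) =====
theorem sauce_blender_spec : Claim_equal_sauce_blender := by
  intro sauce instance_ _
  show sauce_blender sauce instance_ = sauce_blender_alt sauce instance_
  by_cases h13 : instance_ = 1 ∨ instance_ = 3
  · rcases h13 with h | h <;> subst h <;> simp [sauce_blender, sauce_blender_alt]
  · rw [not_or] at h13
    have b1 : (instance_ == 1) = false := by simp [h13.1]
    have b3 : (instance_ == 3) = false := by simp [h13.2]
    by_cases h2 : instance_ = 2
    · subst h2
      simp only [sauce_blender, sauce_blender_alt]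
      norm_num
      obtain ⟨t', ht'⟩ := loopA sauce.length sauce.toList [] ' ' (by simp) (by simp)
      simp only [List.nil_append, List.length_nil, String.length_toList] at ht'
      rw [List.range_eq_range', ht',
        show ((sauce.length : Int)) = ((sauce.toList.length : Int)) by simp, altB_eq_swapPairs]
    · have b2 : (instance_ == 2) = false := by simp [h2]
      simp [sauce_blender, sauce_blender_alt, b1, b2, b3]
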